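-- pv_equiv track=rewrite | github.com/UnaryLab/chopper | chopper/profile/merge.py | promote
-- ===== SOURCE A (Python) =====
-- def promote(cpu_ops, labeled):
--     """Promote fwdbwd labels up to parent cpu_ops with the same sequence number.
--     This ensures siblings of the linked op also get covered when we propagate down."""
--     seq_to_label = {}
--     for eid, label in labeled.items():
--         seq = cpu_ops[eid].get('seq')
--         if seq is not None:
--             seq_to_label[seq] = label
--
--     result = dict(labeled)
--     for eid, op in cpu_ops.items():
--         if eid in result:
--             continue
--         seq = op.get('seq')
--         if seq is not None and seq in seq_to_label:
--             result[eid] = seq_to_label[seq]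
--     return result
-- ===== SOURCE B (Python) =====
-- def promote(cpu_ops, labeled):
--     """Promote fwdbwd labels up to parent cpu_ops with the same sequence number."""
--     # Index the ops by sequence number once.
--     seq_to_eids = {}
--     for eid, op in cpu_ops.items():
--         seq = op.get('seq')
--         if seq is not None:
--             seq_to_eids.setdefault(seq, []).append(eid)
--
--     # Push each label onto every sibling of its op; later labels overwrite.
--     promoted = {}
--     for eid, label in labeled.items():
--         seq = cpu_ops[eid].get('seq')
--         if seq is not None:
--             for sib in seq_to_eids[seq]:
--                 if sib not in labeled:
--                     promoted[sib] = label
--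
--     # Emit the promoted entries in cpu_ops order, after the original labels.
--     return {**labeled, **{eid: promoted[eid] for eid in cpu_ops if eid in promoted}}
-- ===== Notes on version B (the rewrite author's own statement) =====
-- stated objective: alternative
-- what changed: Instead of A's seq->label map consulted while scanning cpu_ops, B builds an inverse index seq->eids once, pushes each label onto the unlabeled siblings of its op (last writer wins), and finally merges the promoted entries after the labels in cpu_ops order.
import Mathlib
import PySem

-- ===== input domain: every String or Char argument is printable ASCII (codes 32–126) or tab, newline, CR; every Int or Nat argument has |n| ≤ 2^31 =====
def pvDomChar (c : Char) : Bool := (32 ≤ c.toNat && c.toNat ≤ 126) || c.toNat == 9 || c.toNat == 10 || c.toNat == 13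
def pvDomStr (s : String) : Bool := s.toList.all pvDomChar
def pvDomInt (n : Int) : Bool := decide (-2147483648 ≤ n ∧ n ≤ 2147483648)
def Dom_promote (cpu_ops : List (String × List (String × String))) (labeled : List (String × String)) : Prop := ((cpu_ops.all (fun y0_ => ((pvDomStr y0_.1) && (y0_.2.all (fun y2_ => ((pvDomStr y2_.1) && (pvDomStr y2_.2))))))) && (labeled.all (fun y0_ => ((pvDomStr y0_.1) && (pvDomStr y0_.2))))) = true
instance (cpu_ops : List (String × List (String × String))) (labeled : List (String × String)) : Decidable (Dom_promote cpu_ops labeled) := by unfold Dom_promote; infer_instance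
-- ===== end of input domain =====

-- B replaces A's seq->label map scanned against cpu_ops by an inverse index seq->eids,
-- propagating each label to the unlabeled siblings of its op, then merging in cpu_ops order
-- (objective: alternative decomposition, same cost).

-- ===== PORT A =====
def promote (cpu_ops : List (String × List (String × String))) (labeled : List (String × String)) : List (String × String) :=
  let cpuD : PySem.Dict String (PySem.Dict String String) :=
    PySem.Dict.ofList (cpu_ops.map (fun p => (p.1, PySem.Dict.ofList p.2)))
  let labD : PySem.Dict String String := PySem.Dict.ofList labeled
  -- seq_to_label = {}; for eid, label in labeled.items(): …
  let stl : PySem.Dict String String := labD.items.foldl (fun d q =>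
      match cpuD.get? q.1 with          -- cpu_ops[eid]: none = KeyError, outside Pre_
      | some op =>
        match op.get? "seq" with
        | some s => d.insert s q.2
        | none => d
      | none => d) PySem.Dict.empty
  -- result = dict(labeled); for eid, op in cpu_ops.items(): …
  let result : PySem.Dict String String := cpuD.items.foldl (fun r p =>
      if r.contains p.1 then r
      else
        match p.2.get? "seq" with
        | some s =>
          match stl.get? s with
          | some lab => r.insert p.1 lab
          | none => r
        | none => r) labD
  result.items

-- ===== PORT B =====
def promote_alt (cpu_ops : List (String × List (String × String))) (labeled : List (String × String)) : List (String × String) :=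
  let cpuD : PySem.Dict String (PySem.Dict String String) :=
    PySem.Dict.ofList (cpu_ops.map (fun p => (p.1, PySem.Dict.ofList p.2)))
  let labD : PySem.Dict String String := PySem.Dict.ofList labeled
  -- seq_to_eids = {}; for eid, op in cpu_ops.items(): … setdefault(seq, []).append(eid)
  let ste : PySem.Dict String (List String) := cpuD.items.foldl (fun d p =>
      match p.2.get? "seq" with
      | some s => d.modify s [] (fun l => l ++ [p.1])
      | none => d) PySem.Dict.empty
  -- promoted = {}; for eid, label in labeled.items(): …
  let promoted : PySem.Dict String String := labD.items.foldl (fun pr q =>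
      match cpuD.get? q.1 with          -- cpu_ops[eid]: none = KeyError, outside Pre_
      | some op =>
        match op.get? "seq" with
        | some s =>
          (ste.getD s []).foldl (fun pr sib =>
            if labD.contains sib then pr else pr.insert sib q.2) pr
        | none => pr
      | none => pr) PySem.Dict.empty
  -- {eid: promoted[eid] for eid in cpu_ops if eid in promoted}
  let comp : PySem.Dict String String := cpuD.keys.foldl (fun d e =>
      match promoted.get? e with
      | some v => d.insert e v
      | none => d) PySem.Dict.empty
  -- {**labeled, **comp}
  (comp.items.foldl (fun d p => d.insert p.1 p.2) labD).items

-- ===== PRECONDITION & SPEC =====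
-- Pre_ excludes exactly the inputs on which Python A raises KeyError: a labeled eid absent
-- from cpu_ops (B raises there too).
def Pre_promote (cpu_ops : List (String × List (String × String))) (labeled : List (String × String)) : Prop :=
  (labeled.all (fun q => cpu_ops.any (fun p => p.1 == q.1))) = true
instance (cpu_ops : List (String × List (String × String))) (labeled : List (String × String)) : Decidable (Pre_promote cpu_ops labeled) := by unfold Pre_promote; infer_instance

def pvWitness_promote : (List (String × List (String × String))) × (List (String × String)) :=
  ([("a", [("seq", "1")]), ("b", [("seq", "1")]), ("c", [])], [("a", "L")])

def Spec_promote (cpu_ops : List (String × List (String × String))) (labeled : List (String × String)) (out : List (String × String)) : Prop := out = promote_alt cpu_ops labeled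
instance (cpu_ops : List (String × List (String × String))) (labeled : List (String × String)) (out : List (String × String)) : Decidable (Spec_promote cpu_ops labeled out) := by unfold Spec_promote; infer_instance

-- ===== CLAIM (what is proved, stated in full; the proofs are below) =====
def Claim_equal_promote : Prop := ∀ (cpu_ops : List (String × List (String × String))) (labeled : List (String × String)), Dom_promote cpu_ops labeled → Pre_promote cpu_ops labeled → Spec_promote cpu_ops labeled (promote cpu_ops labeled)



-- ===== LEMMAS AND PROOFS =====

-- seq of the op registered under eid e (missing eid / missing "seq" is none)
def pvSeqOf (cpuD : PySem.Dict String (PySem.Dict String String)) (e : String) : Option String :=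
  (cpuD.get? e).bind (fun op => op.get? "seq")

-- the eids of cpu_ops whose op has sequence number s, in cpu_ops order
def pvGrp (cpuD : PySem.Dict String (PySem.Dict String String)) (s : String) : List String :=
  (cpuD.items.filter (fun p => p.2.get? "seq" == some s)).map Prod.fst

-- the eids that labeled entry q writes to in B's propagation loop
def pvAq (cpuD : PySem.Dict String (PySem.Dict String String)) (labD : PySem.Dict String String)
    (q : String × String) : List String :=
  match pvSeqOf cpuD q.1 with
  | some s => (pvGrp cpuD s).filter (fun sib => !labD.contains sib)
  | none => []

-- lookup in a fold of optional keyed inserts = value of the last matching source element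
theorem pv_foldl_insertOpt_get? {a : Type} (k : a -> Option String) (v : a -> String) :
    forall (l : List a) (d : PySem.Dict String String) (s : String),
    (l.foldl (fun d q => match k q with | some s' => d.insert s' (v q) | none => d) d).get? s
    = (match (l.filter (fun q => k q == some s)).getLast? with
       | some q => some (v q)
       | none => d.get? s) := by
  intro l
  induction l with
  | nil => intro d s; rfl
  | cons q rest ih =>
    intro d s
    simp only [List.foldl_cons, List.filter_cons]
    cases hk : k q with
    | none => rw [ih]; simp []
    | some s' =>
      rw [ih]
      by_cases hs : s' = s
      · subst hs
        have hbeq : (k q == some s') = true := by simp [hk]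
        simp only []
        cases hfl : (rest.filter (fun q => k q == some s')).getLast? with
        | some q' => simp [hfl, List.getLast?_cons]
        | none => simp [hfl, List.getLast?_cons, PySem.Dict.get?_insert_self]
      · have hbeq : (k q == some s) = false := by simp [hk]; exact fun h => hs h
        simp only []
        cases hfl : (rest.filter (fun q => k q == some s)).getLast? with
        | some q' => simp [hfl, hs]
        | none => simp [hfl, hs, PySem.Dict.get?_insert, Ne.symm hs]

-- lookup in a fold of constant-value inserts
theorem pv_foldl_insert_const_get? (v : String) :
    forall (sibs : List String) (pr : PySem.Dict String String) (x : String),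
    (sibs.foldl (fun pr sib => pr.insert sib v) pr).get? x
    = if x ∈ sibs then some v else pr.get? x := by
  intro sibs
  induction sibs with
  | nil => intro pr x; simp
  | cons sib rest ih =>
    intro pr x
    simp only [List.foldl_cons]
    rw [ih]
    by_cases hx : x ∈ rest
    · simp [hx]
    · by_cases he : x = sib
      · subst he; simp [hx, PySem.Dict.get?_insert_self]
      · simp [hx, he, PySem.Dict.get?_insert]

-- a loop that skips under a Boolean guard is a loop over the filtered list
theorem pv_foldl_if_skip {a b : Type} (c : a -> Bool) (f : b -> a -> b) :
    forall (l : List a) (pr : b),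
    l.foldl (fun pr x => if c x then pr else f pr x) pr
    = (l.filter (fun x => !c x)).foldl f pr := by
  intro l
  induction l with
  | nil => intro pr; rfl
  | cons x rest ih =>
    intro pr
    cases hc : c x <;> simp [hc, ih]

-- lookup in a fold that inserts one value at a whole batch of keys per element
theorem pv_foldl_multiinsert_get? {a : Type} (A : a -> List String) (v : a -> String) :
    forall (l : List a) (pr : PySem.Dict String String) (x : String),
    (l.foldl (fun pr q => (A q).foldl (fun pr sib => pr.insert sib (v q)) pr) pr).get? x
    = (match (l.filter (fun q => (A q).contains x)).getLast? with
       | some q => some (v q)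
       | none => pr.get? x) := by
  intro l
  induction l with
  | nil => intro pr x; rfl
  | cons q rest ih =>
    intro pr x
    simp only [List.foldl_cons, List.filter_cons]
    rw [ih]
    cases hc : (A q).contains x with
    | false =>
      have hx : x ∉ A q := by
        intro hm; rw [List.contains_iff_mem.mpr hm] at hc; exact Bool.false_ne_true hc.symm
      simp only [Bool.false_eq_true, reduceIte]
      cases hfl : (rest.filter (fun q => (A q).contains x)).getLast? with
      | some q' => simp only []
      | none =>
        simp only []
        rw [pv_foldl_insert_const_get?]
        simp [hx]
    | true =>
      have hx : x ∈ A q := List.contains_iff_mem.mp hc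
      simp only [reduceIte, List.getLast?_cons]
      cases hfl : (rest.filter (fun q => (A q).contains x)).getLast? with
      | some q' => simp only [Option.getD_some]
      | none =>
        simp only [Option.getD_none]
        rw [pv_foldl_insert_const_get?]
        simp [hx]

-- the group list built by B's setdefault/append loop
theorem pv_ste_getD (s : String) :
    forall (l : List (String × PySem.Dict String String)) (d : PySem.Dict String (List String)),
    (l.foldl (fun d p => match p.2.get? "seq" with
        | some s' => d.modify s' [] (fun ll => ll ++ [p.1])
        | none => d) d).getD s []
    = d.getD s [] ++ (l.filter (fun p => p.2.get? "seq" == some s)).map Prod.fst := by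
  intro l
  induction l with
  | nil => intro d; simp
  | cons p rest ih =>
    intro d
    simp only [List.foldl_cons, List.filter_cons]
    cases hk : p.2.get? "seq" with
    | none => simp [ih]
    | some s' =>
      rw [ih]
      by_cases hs : s' = s
      · subst hs; simp [PySem.Dict.getD_modify_self]
      · have hbeq : (some s' == some s) = false := by simp [hs]
        rw [PySem.Dict.getD_modify]
        simp [hbeq, Ne.symm hs]

-- A's second loop: conditional fresh inserts append after the start dict
theorem pv_items_foldl_condinsertOpt {V : Type} (F : String × V -> Option String) :
    forall (l : List (String × V)) (r : PySem.Dict String String),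
    (l.map Prod.fst).Nodup -> r.keys.Nodup ->
    (l.foldl (fun r p => if r.contains p.1 then r
        else match F p with | some lab => r.insert p.1 lab | none => r) r).items
    = r.items ++ l.filterMap (fun p => if r.contains p.1 then none
        else (F p).map (fun lab => (p.1, lab))) := by
  intro l
  induction l with
  | nil => intro r _ _; simp
  | cons p rest ih =>
    intro r hnd hr
    have hp1 : p.1 ∉ rest.map Prod.fst := by
      simp only [List.map_cons, List.nodup_cons] at hnd; exact hnd.1
    have hnd' : (rest.map Prod.fst).Nodup := by
      simp only [List.map_cons, List.nodup_cons] at hnd; exact hnd.2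
    simp only [List.foldl_cons, List.filterMap_cons]
    cases hc : r.contains p.1 with
    | true => simp only [if_pos]; rw [ih _ hnd' hr]
    | false =>
      simp only [Bool.false_eq_true, reduceIte]
      cases hF : F p with
      | none => rw [ih _ hnd' hr]; simp
      | some lab =>
        rw [ih _ hnd' (PySem.Dict.nodup_keys_insert _ _ _ hr)]
        rw [PySem.Dict.items_insert_of_not_contains _ _ hc]
        rw [List.filterMap_congr (g := fun q => if r.contains q.1 then none
            else (F q).map (fun lab => (q.1, lab))) ?_]
        · simp [List.append_assoc]
        · intro q hq
          have hne : q.1 ≠ p.1 := fun h => hp1 (h ▸ List.mem_map_of_mem hq)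
          rw [PySem.Dict.contains_insert]
          simp [hne]

-- B's comprehension: a fold of optional inserts at fresh distinct keys
theorem pv_items_foldl_insertOpt (G : String -> Option String) :
    forall (ks : List String) (d : PySem.Dict String String),
    ks.Nodup -> (forall e, e ∈ ks -> d.contains e = false) ->
    (ks.foldl (fun d e => match G e with | some v => d.insert e v | none => d) d).items
    = d.items ++ ks.filterMap (fun e => (G e).map (fun v => (e, v))) := by
  intro ks
  induction ks with
  | nil => intro d _ _; simp
  | cons e rest ih =>
    intro d hnd hfr
    have he : e ∉ rest := (List.nodup_cons.mp hnd).1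
    simp only [List.foldl_cons, List.filterMap_cons]
    cases hG : G e with
    | none =>
      rw [ih _ (List.nodup_cons.mp hnd).2 (fun e' he' => hfr e' (List.mem_cons_of_mem _ he'))]
      simp
    | some v =>
      rw [ih _ (List.nodup_cons.mp hnd).2 ?_]
      · rw [PySem.Dict.items_insert_of_not_contains _ _ (hfr e (List.mem_cons_self ..))]
        simp [List.append_assoc]
      · intro e' he'
        rw [PySem.Dict.contains_insert]
        have hne : e' ≠ e := fun h => he (h ▸ he')
        simp [hne, hfr e' (List.mem_cons_of_mem _ he')]

theorem pv_map_fst_filterMap (G : String -> Option String) :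
    forall (ks : List String),
    (ks.filterMap (fun e => (G e).map (fun v => (e, v)))).map Prod.fst
    = ks.filter (fun e => (G e).isSome) := by
  intro ks
  induction ks with
  | nil => rfl
  | cons e rest ih =>
    cases h : G e <;> simp [h, ih]

-- ===== VERDICT (by name: the statement is the Claim_ definition above) =====
theorem promote_spec : Claim_equal_promote := by
  intro cpu_ops labeled _ _
  unfold Spec_promote
  simp only [promote, promote_alt]
  have hkc : (PySem.Dict.ofList (cpu_ops.map (fun p => (p.1, PySem.Dict.ofList p.2)))).keys.Nodup :=
    PySem.Dict.nodup_keys_ofList _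
  have hkl : (PySem.Dict.ofList labeled).keys.Nodup := PySem.Dict.nodup_keys_ofList _
  generalize hC : PySem.Dict.ofList (cpu_ops.map (fun p => (p.1, PySem.Dict.ofList p.2))) = cpuD
  rw [hC] at hkc
  generalize hL : PySem.Dict.ofList labeled = labD
  rw [hL] at hkl
  -- characterize A's seq_to_label
  generalize hS : (labD.items.foldl (fun d q =>
      match cpuD.get? q.1 with
      | some op =>
        match op.get? "seq" with
        | some s => d.insert s q.2
        | none => d
      | none => d) PySem.Dict.empty) = stl
  have hstl : ∀ s, stl.get? s
      = (match (labD.items.filter (fun q => pvSeqOf cpuD q.1 == some s)).getLast? with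
         | some q => some q.2
         | none => none) := by
    intro s
    rw [← hS]
    have hfun : (fun (d : PySem.Dict String String) (q : String × String) =>
        match cpuD.get? q.1 with
        | some op =>
          match op.get? "seq" with
          | some s => d.insert s q.2
          | none => d
        | none => d)
        = (fun d q => match pvSeqOf cpuD q.1 with | some s' => d.insert s' q.2 | none => d) := by
      funext d q
      unfold pvSeqOf
      cases cpuD.get? q.1 <;> rfl
    rw [hfun, pv_foldl_insertOpt_get? (fun q => pvSeqOf cpuD q.1) Prod.snd]
    cases h : (labD.items.filter (fun q => pvSeqOf cpuD q.1 == some s)).getLast? <;>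
      simp [PySem.Dict.get?_empty]
  -- characterize B's seq_to_eids
  generalize hE : (cpuD.items.foldl (fun d p =>
      match p.2.get? "seq" with
      | some s => d.modify s [] (fun l => l ++ [p.1])
      | none => d) PySem.Dict.empty) = ste
  have hgrp : ∀ s, ste.getD s [] = pvGrp cpuD s := by
    intro s
    rw [← hE, pv_ste_getD]
    simp [pvGrp, PySem.Dict.getD_empty]
  -- characterize B's promoted
  have hfunB : (fun (pr : PySem.Dict String String) (q : String × String) =>
      match cpuD.get? q.1 with
      | some op =>
        match op.get? "seq" with
        | some s =>
          (ste.getD s []).foldl (fun pr sib =>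
            if labD.contains sib then pr else pr.insert sib q.2) pr
        | none => pr
      | none => pr)
      = (fun pr q => (pvAq cpuD labD q).foldl (fun pr sib => pr.insert sib q.2) pr) := by
    funext pr q
    unfold pvAq pvSeqOf
    cases cpuD.get? q.1 with
    | none => rfl
    | some op =>
      simp only [Option.bind_some]
      cases op.get? "seq" with
      | none => rfl
      | some s =>
        exact (pv_foldl_if_skip (fun sib => labD.contains sib)
          (fun pr sib => pr.insert sib q.2) (ste.getD s []) pr).trans (by rw [hgrp])
  rw [hfunB]
  generalize hP : (labD.items.foldl (fun pr q =>
      (pvAq cpuD labD q).foldl (fun pr sib => pr.insert sib q.2) pr) PySem.Dict.empty) = promoted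
  have hprom : ∀ x, promoted.get? x
      = (match (labD.items.filter (fun q => (pvAq cpuD labD q).contains x)).getLast? with
         | some q => some q.2
         | none => none) := by
    intro x
    rw [← hP, pv_foldl_multiinsert_get? (pvAq cpuD labD) Prod.snd]
    cases h : (labD.items.filter (fun q => (pvAq cpuD labD q).contains x)).getLast? <;>
      simp [PySem.Dict.get?_empty]
  -- characterize B's comprehension dict
  generalize hQ : (cpuD.keys.foldl (fun d e =>
      match promoted.get? e with
      | some v => d.insert e v
      | none => d) PySem.Dict.empty) = comp
  have hcomp : comp.items = cpuD.keys.filterMap (fun e => (promoted.get? e).map (fun v => (e, v))) := by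
    rw [← hQ, pv_items_foldl_insertOpt promoted.get? cpuD.keys PySem.Dict.empty hkc
      (fun e _ => PySem.Dict.contains_empty e)]
    rfl
  -- promoted entries are never labeled, and their keys are distinct
  have hfr : ∀ a ∈ comp.items, labD.contains a.1 = false := by
    intro a ha
    rw [hcomp] at ha
    obtain ⟨e, he, hmap⟩ := List.mem_filterMap.mp ha
    cases hg : promoted.get? e with
    | none => rw [hg] at hmap; exact absurd hmap (by simp)
    | some v =>
      rw [hg] at hmap
      have hae : a = (e, v) := by simpa using hmap.symm
      subst hae
      rw [hprom e] at hg
      cases hfl : (labD.items.filter (fun q => (pvAq cpuD labD q).contains e)).getLast? with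
      | none => rw [hfl] at hg; exact absurd hg (by simp)
      | some q =>
        have hq := List.mem_of_getLast? hfl
        have hcont := (List.mem_filter.mp hq).2
        have hm := List.contains_iff_mem.mp hcont
        unfold pvAq at hm
        cases hsq : pvSeqOf cpuD q.1 with
        | none => rw [hsq] at hm; exact absurd hm (by simp)
        | some s =>
          rw [hsq] at hm
          have := (List.mem_filter.mp hm).2
          simpa using this
  have hndB : (comp.items.map Prod.fst).Nodup := by
    rw [hcomp, pv_map_fst_filterMap]
    exact hkc.filter _
  rw [PySem.Dict.items_foldl_insert_fresh comp.items Prod.fst Prod.snd labD hfr hndB]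
  -- rewrite A's second loop
  have hfunA : (fun (r : PySem.Dict String String) (p : String × PySem.Dict String String) =>
      if r.contains p.1 then r
      else
        match p.2.get? "seq" with
        | some s =>
          match stl.get? s with
          | some lab => r.insert p.1 lab
          | none => r
        | none => r)
      = (fun r p => if r.contains p.1 then r
          else match (match p.2.get? "seq" with | some s => stl.get? s | none => none) with
            | some lab => r.insert p.1 lab
            | none => r) := by
    funext r p
    cases p.2.get? "seq" <;> rfl
  rw [hfunA, pv_items_foldl_condinsertOpt
    (fun p => match p.2.get? "seq" with | some s => stl.get? s | none => none)
    cpuD.items labD hkc hkl]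
  -- the two tails agree item by item
  congr 1
  · rw [hcomp]
    have hkeys : cpuD.keys = cpuD.items.map Prod.fst := rfl
    rw [hkeys, List.filterMap_map]
    rw [List.map_congr_left (fun a _ => (Prod.mk.eta : (a.1, a.2) = a)), List.map_id']
    apply List.filterMap_congr
    intro p hp
    have hmemgrp : ∀ s, p.1 ∈ pvGrp cpuD s ↔ p.2.get? "seq" = some s := by
      intro s
      unfold pvGrp
      constructor
      · intro hm
        simp only [List.mem_map, List.mem_filter] at hm
        obtain ⟨p', ⟨hp', hbeq⟩, hfst⟩ := hm
        have hpp : p' = p := List.inj_on_of_nodup_map hkc hp' hp hfst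
        subst hpp
        exact beq_iff_eq.mp hbeq
      · intro h
        exact List.mem_map.mpr ⟨p, List.mem_filter.mpr ⟨hp, by simp [h]⟩, rfl⟩
    simp only [Function.comp_apply]
    rw [hprom p.1]
    cases hlc : labD.contains p.1 with
    | true =>
      have hemp : labD.items.filter (fun q => (pvAq cpuD labD q).contains p.1) = [] := by
        apply List.filter_eq_nil_iff.mpr
        intro q hq hc
        have hm := List.contains_iff_mem.mp hc
        unfold pvAq at hm
        cases hsq : pvSeqOf cpuD q.1 with
        | none => rw [hsq] at hm; exact absurd hm (by simp)
        | some s =>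
          rw [hsq] at hm
          have := (List.mem_filter.mp hm).2
          rw [hlc] at this
          exact absurd this (by simp)
      rw [hemp]
      simp []
    | false =>
      cases hseq : p.2.get? "seq" with
      | none =>
        have hemp : labD.items.filter (fun q => (pvAq cpuD labD q).contains p.1) = [] := by
          apply List.filter_eq_nil_iff.mpr
          intro q hq hc
          have hm := List.contains_iff_mem.mp hc
          unfold pvAq at hm
          cases hsq : pvSeqOf cpuD q.1 with
          | none => rw [hsq] at hm; exact absurd hm (by simp)
          | some s =>
            rw [hsq] at hm
            have := (hmemgrp s).mp (List.mem_filter.mp hm).1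
            rw [hseq] at this
            exact absurd this (by simp)
        rw [hemp]
        simp []
      | some s0 =>
        have hpred : ∀ q ∈ labD.items,
            ((pvAq cpuD labD q).contains p.1) = (pvSeqOf cpuD q.1 == some s0) := by
          intro q _
          unfold pvAq
          cases hsq : pvSeqOf cpuD q.1 with
          | none => simp
          | some s =>
            by_cases hss : s = s0
            · subst hss
              have hin : p.1 ∈ pvGrp cpuD s := (hmemgrp s).mpr hseq
              simp [hin, hlc]
            · have hng : p.1 ∉ pvGrp cpuD s := by
                intro hm
                have h2 := (hmemgrp s).mp hm
                rw [hseq] at h2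
                exact hss (Option.some.inj h2).symm
              simp [hng, hss]
        rw [List.filter_congr hpred]
        simp only [Bool.false_eq_true, reduceIte]
        simp only [hstl s0]
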